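-- pv_equiv track=rewrite | github.com/paullozen/autofx | generate_suggestions.py | group_lines
-- ===== SOURCE A (Python) =====
-- def group_lines(lines, group_size:int):
--     if group_size <= 1:
--         return lines
--     chunks = []
--     for i in range(0, len(lines), group_size):
--         chunk = " ".join(lines[i:i+group_size]).strip()
--         if chunk:
--             chunks.append(chunk)
--     return chunks
-- ===== SOURCE B (Python) =====
-- def group_lines(lines, group_size: int):
--     if group_size <= 1:
--         return lines
--     chunks = []
--     buffer = []
--     for line in lines:
--         buffer.append(line)
--         if len(buffer) == group_size:
--             chunk = " ".join(buffer).strip()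
--             if chunk:
--                 chunks.append(chunk)
--             buffer = []
--     if buffer:
--         chunk = " ".join(buffer).strip()
--         if chunk:
--             chunks.append(chunk)
--     return chunks
-- ===== Notes on version B (the rewrite author's own statement) =====
-- stated objective: alternative
-- what changed: Replaces the index-stepping range(0, len, k) loop with slicing by a single pass over the lines that maintains a buffer list, flushing it (join, strip, append-if-nonempty) whenever it reaches group_size and once more at the end.
import Mathlib
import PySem

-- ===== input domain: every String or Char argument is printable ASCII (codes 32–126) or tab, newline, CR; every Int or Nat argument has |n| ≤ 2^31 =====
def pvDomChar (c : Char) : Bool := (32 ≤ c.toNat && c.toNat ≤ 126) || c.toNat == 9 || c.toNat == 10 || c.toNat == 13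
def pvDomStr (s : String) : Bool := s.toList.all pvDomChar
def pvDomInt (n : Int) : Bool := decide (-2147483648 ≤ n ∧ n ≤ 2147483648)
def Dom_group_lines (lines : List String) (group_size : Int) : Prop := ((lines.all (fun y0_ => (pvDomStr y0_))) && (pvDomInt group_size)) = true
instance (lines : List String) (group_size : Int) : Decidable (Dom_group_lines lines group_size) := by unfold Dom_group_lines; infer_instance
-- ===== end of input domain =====

-- B replaces A's index-stepping range/slice loop by a single pass with a buffer list flushed at each group boundary (alternative decomposition, same cost).


-- ===== PORT A =====
def group_lines (lines : List String) (group_size : Int) : List String :=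
  if group_size ≤ 1 then lines
  else
    (PySem.List.pyRange 0 (PySem.List.len lines) group_size).foldl
      (fun chunks i =>
        let chunk := PySem.Str.strip (PySem.Str.join " " (PySem.List.slice lines (some i) (some (i + group_size))))
        if chunk ≠ "" then chunks ++ [chunk] else chunks)
      []

-- ===== PORT B =====
-- join the buffer with " ", strip, append if non-empty (B's flush step)
def glFlush (chunks : List String) (buffer : List String) : List String :=
  let chunk := PySem.Str.strip (PySem.Str.join " " buffer)
  if chunk ≠ "" then chunks ++ [chunk] else chunks

def group_lines_alt (lines : List String) (group_size : Int) : List String :=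
  if group_size ≤ 1 then lines
  else
    let st := lines.foldl
      (fun (st : List String × List String) line =>
        let buffer := st.2 ++ [line]
        if PySem.List.len buffer = group_size then (glFlush st.1 buffer, [])
        else (st.1, buffer))
      ([], [])
    if st.2 ≠ [] then glFlush st.1 st.2 else st.1

-- ===== PRECONDITION & SPEC =====
def Spec_group_lines (lines : List String) (group_size : Int) (out : List String) : Prop := out = group_lines_alt lines group_size
instance (lines : List String) (group_size : Int) (out : List String) : Decidable (Spec_group_lines lines group_size out) := by unfold Spec_group_lines; infer_instance

-- ===== CLAIM (what is proved, stated in full; the proofs are below) =====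
def Claim_equal_group_lines : Prop := ∀ (lines : List String) (group_size : Int), Dom_group_lines lines group_size → Spec_group_lines lines group_size (group_lines lines group_size)

-- ===== LEMMAS AND PROOFS =====

-- one flushed group as a list fragment
def flushOne (buf : List String) : List String :=
  let c := PySem.Str.strip (PySem.Str.join " " buf)
  if c ≠ "" then [c] else []

-- common specification: the lines grouped s at a time, each group flushed
def glSpec (s : Nat) (l : List String) : List String :=
  if s = 0 ∨ l = [] then []
  else flushOne (l.take s) ++ glSpec s (l.drop s)
termination_by l.length
decreasing_by
  rename_i h
  push Not at h
  have := List.length_pos_iff.mpr h.2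
  simp [List.length_drop]
  omega

lemma glSpec_nil (s : Nat) : glSpec s [] = [] := by
  rw [glSpec]; simp

lemma glSpec_step (s : Nat) (l : List String) (hs : s ≠ 0) (hl : l ≠ []) :
    glSpec s l = flushOne (l.take s) ++ glSpec s (l.drop s) := by
  rw [glSpec]; simp [hs, hl]

lemma glFlush_eq (chunks buf : List String) : glFlush chunks buf = chunks ++ flushOne buf := by
  unfold glFlush flushOne
  dsimp only
  split <;> simp

-- A-side helpers (named forms of the port's lambdas, for the lemmas below)
def aStep (lines : List String) (g : Int) (chunks : List String) (i : Int) : List String :=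
  let chunk := PySem.Str.strip (PySem.Str.join " " (PySem.List.slice lines (some i) (some (i + g))))
  if chunk ≠ "" then chunks ++ [chunk] else chunks

lemma aStep_eq (lines : List String) (g : Int) (chunks : List String) (i : Int) :
    aStep lines g chunks i = chunks ++ flushOne (PySem.List.slice lines (some i) (some (i + g))) := by
  unfold aStep flushOne
  dsimp only
  split <;> simp

lemma group_lines_eq (lines : List String) (g : Int) (h : ¬ g ≤ 1) :
    group_lines lines g = (PySem.List.pyRange 0 (PySem.List.len lines) g).foldl (aStep lines g) [] := by
  unfold group_lines
  rw [if_neg h]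
  rfl

-- B-side helpers
def bStep (g : Int) (st : List String × List String) (line : String) : List String × List String :=
  let buffer := st.2 ++ [line]
  if PySem.List.len buffer = g then (glFlush st.1 buffer, [])
  else (st.1, buffer)

def bFin (st : List String × List String) : List String :=
  if st.2 ≠ [] then glFlush st.1 st.2 else st.1

lemma group_lines_alt_eq (lines : List String) (g : Int) (h : ¬ g ≤ 1) :
    group_lines_alt lines g = bFin (lines.foldl (bStep g) ([], [])) := by
  unfold group_lines_alt bStep bFin
  rw [if_neg h]

-- pyRange with positive step: induction forms
lemma pyRange_pos_nil (a b s : Int) (hs : 0 < s) (hab : b ≤ a) :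
    PySem.List.pyRange a b s = [] := by
  rw [PySem.List.pyRange_of_pos a b hs]
  rw [if_neg (by omega : ¬ a < b)]
  simp

lemma pyRange_pos_cons (a b s : Int) (hs : 0 < s) (hab : a < b) :
    PySem.List.pyRange a b s = a :: PySem.List.pyRange (a + s) b s := by
  rw [PySem.List.pyRange_of_pos a b hs, PySem.List.pyRange_of_pos (a + s) b hs]
  have hdiv : (b - a + s - 1) / s = (b - a - 1) / s + 1 := by
    have h0 := Int.add_mul_ediv_right (b - a - 1) 1 (by omega : s ≠ 0)
    have h1 : b - a + s - 1 = b - a - 1 + 1 * s := by ring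
    rw [h1, h0]
  have hq0 : 0 ≤ (b - a - 1) / s := Int.ediv_nonneg (by omega) (by omega)
  rw [if_pos hab, hdiv]
  have hm : ((b - a - 1) / s + 1).toNat = ((b - a - 1) / s).toNat + 1 := by omega
  rw [hm, List.range_succ_eq_map, List.map_cons, List.map_map]
  by_cases hlt : a + s < b
  · rw [if_pos hlt]
    have h2 : b - (a + s) + s - 1 = b - a - 1 := by ring
    rw [h2]
    congr 1
    · simp
    · apply List.map_congr_left
      intro k _
      simp only [Function.comp_apply]
      push_cast
      ring
  · rw [if_neg hlt]
    have hz : (b - a - 1) / s = 0 := Int.ediv_eq_zero_of_lt (by omega) (by omega)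
    rw [hz]
    simp

-- the A loop computes glSpec
lemma A_loop (lines : List String) (g : Int) (hg : 1 < g) :
    ∀ (n a : Nat) (acc : List String), lines.length - a ≤ n →
      (PySem.List.pyRange (a : Int) (PySem.List.len lines) g).foldl (aStep lines g) acc
        = acc ++ glSpec g.toNat (lines.drop a) := by
  have hgs : ((g.toNat : Nat) : Int) = g := Int.toNat_of_nonneg (by omega)
  intro n
  induction n with
  | zero =>
    intro a acc hle
    have hla : lines.length ≤ a := by omega
    rw [pyRange_pos_nil _ _ _ (by omega) (by simp [PySem.List.len]; omega)]
    rw [List.drop_eq_nil_of_le hla, glSpec_nil]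
    simp
  | succ n ih =>
    intro a acc hle
    by_cases hlt : a < lines.length
    · rw [pyRange_pos_cons _ _ _ (by omega) (by simp [PySem.List.len]; omega)]
      rw [List.foldl_cons, aStep_eq]
      have hsl : PySem.List.slice lines (some (a : Int)) (some ((a : Int) + g))
          = (lines.drop a).take g.toNat := by
        have h := PySem.List.slice_natCast_add lines a g.toNat
        rw [hgs] at h
        exact h
      have hcast : (((a + g.toNat : Nat)) : Int) = (a : Int) + g := by push_cast; omega
      rw [hsl, ← hcast, ih (a + g.toNat) _ (by omega)]
      rw [glSpec_step g.toNat (lines.drop a) (by omega) (by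
        intro hnil
        have := congrArg List.length hnil
        simp at this
        omega)]
      rw [List.drop_drop, List.append_assoc]
    · rw [pyRange_pos_nil _ _ _ (by omega) (by simp [PySem.List.len]; omega)]
      rw [List.drop_eq_nil_of_le (by omega), glSpec_nil]
      simp

-- the B loop computes glSpec
lemma B_loop (g : Int) (hg : 1 < g) :
    ∀ (l : List String) (chunks buf : List String), buf.length < g.toNat →
      bFin (l.foldl (bStep g) (chunks, buf)) = chunks ++ glSpec g.toNat (buf ++ l) := by
  have hgs : ((g.toNat : Nat) : Int) = g := Int.toNat_of_nonneg (by omega)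
  intro l
  induction l with
  | nil =>
    intro chunks buf hb
    simp only [List.foldl_nil, List.append_nil]
    by_cases hbuf : buf = []
    · subst hbuf
      simp [bFin, glSpec_nil]
    · unfold bFin
      rw [if_pos (by simpa using hbuf)]
      rw [glSpec_step g.toNat buf (by omega) hbuf]
      rw [List.take_of_length_le (by omega), List.drop_eq_nil_of_le (by omega), glSpec_nil]
      rw [glFlush_eq]
      simp
  | cons x xs ih =>
    intro chunks buf hb
    rw [List.foldl_cons]
    have hlen : PySem.List.len (buf ++ [x]) = ((buf.length + 1 : Nat) : Int) := by
      simp [PySem.List.len]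
    by_cases hfull : buf.length + 1 = g.toNat
    · have hcond : PySem.List.len (buf ++ [x]) = g := by rw [hlen]; omega
      have hstep : bStep g (chunks, buf) x = (glFlush chunks (buf ++ [x]), []) := by
        unfold bStep
        dsimp only
        rw [if_pos hcond]
      rw [hstep, ih (glFlush chunks (buf ++ [x])) [] (by simp only [List.length_nil]; omega)]
      rw [glFlush_eq]
      have hsplit : buf ++ x :: xs = (buf ++ [x]) ++ xs := by simp
      rw [hsplit, glSpec_step g.toNat ((buf ++ [x]) ++ xs) (by omega) (by simp)]
      rw [List.take_left' (by simp; omega), List.drop_left' (by simp; omega)]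
      simp [List.append_assoc]
    · have hcond : ¬ PySem.List.len (buf ++ [x]) = g := by rw [hlen]; omega
      have hstep : bStep g (chunks, buf) x = (chunks, buf ++ [x]) := by
        unfold bStep
        dsimp only
        rw [if_neg hcond]
      rw [hstep, ih chunks (buf ++ [x]) (by simp; omega)]
      simp [List.append_assoc]

-- ===== VERDICT (by name: the statement is the Claim_ definition above) =====
theorem group_lines_spec : Claim_equal_group_lines := by
  intro lines g _
  unfold Spec_group_lines
  by_cases h : g ≤ 1
  · unfold group_lines group_lines_alt
    rw [if_pos h, if_pos h]
  · have hg : 1 < g := by omega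
    rw [group_lines_eq lines g h, group_lines_alt_eq lines g h]
    have hA := A_loop lines g hg lines.length 0 [] (by omega)
    have hB := B_loop g hg lines [] [] (by simp; omega)
    simp only [Nat.cast_zero] at hA
    rw [hA, hB]
    simp
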